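-- pv_equiv track=rewrite | github.com/maccarini/htmldiff2 | htmldiff2/normalization.py | normalize_opcodes_for_delete_first
-- ===== SOURCE A (Python) =====
-- def normalize_opcodes_for_delete_first(opcodes):
--     """
--     Convert adjacent insert/delete pairs into a single replace, so output order
--     becomes deterministic (del then ins).
--     """
--     out = []
--     i = 0
--     while i < len(opcodes):
--         tag, i1, i2, j1, j2 = opcodes[i]
--         if i + 1 < len(opcodes):
--             tag2, i1b, i2b, j1b, j2b = opcodes[i + 1]
--             # insert then delete at the same anchor -> replace
--             if tag == 'insert' and tag2 == 'delete' and i1 == i2 == i1b == i2b and j1b == j2b == j1: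
--                 out.append(('replace', i1b, i2b, j1, j2))
--                 i += 2
--                 continue
--             # delete then insert at the same anchor -> replace (already ok, but unify)
--             if tag == 'delete' and tag2 == 'insert' and j1 == j2 == j1b == j2b and i1b == i2b == i1:
--                 out.append(('replace', i1, i2, j1b, j2b))
--                 i += 2
--                 continue
--         out.append(opcodes[i])
--         i += 1
--     return out
-- ===== SOURCE B (Python) =====
-- def _merge_pair(prev, cur):
--     """Return the ('replace', ...) tuple if prev/cur form a mergeable
--     insert/delete pair at the same anchor, else None."""
--     tag, i1, i2, j1, j2 = prev
--     tag2, i1b, i2b, j1b, j2b = cur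
--     if tag == 'insert' and tag2 == 'delete' and i1 == i2 == i1b == i2b and j1b == j2b == j1:
--         return ('replace', i1b, i2b, j1, j2)
--     if tag == 'delete' and tag2 == 'insert' and j1 == j2 == j1b == j2b and i1b == i2b == i1:
--         return ('replace', i1, i2, j1b, j2b)
--     return None
--
--
-- def normalize_opcodes_for_delete_first(opcodes):
--     """
--     Convert adjacent insert/delete pairs into a single replace, so output order
--     becomes deterministic (del then ins).
--     """
--     out = []
--     for op in opcodes:
--         merged = _merge_pair(out[-1], op) if out else None
--         if merged is not None:
--             out[-1] = merged
--         else: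
--             out.append(op)
--     return out
-- ===== Notes on version B (the rewrite author's own statement) =====
-- stated objective: alternative
-- what changed: Replaced A's indexed while-loop with two-element lookahead and an i += 2 skip by a single forward fold driven by a _merge_pair helper returning the merged tuple or None: each opcode is compared with the last element already emitted and either overwrites it or is appended (a freshly merged 'replace' can never merge again since the conditions require insert/delete tags).
import Mathlib
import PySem

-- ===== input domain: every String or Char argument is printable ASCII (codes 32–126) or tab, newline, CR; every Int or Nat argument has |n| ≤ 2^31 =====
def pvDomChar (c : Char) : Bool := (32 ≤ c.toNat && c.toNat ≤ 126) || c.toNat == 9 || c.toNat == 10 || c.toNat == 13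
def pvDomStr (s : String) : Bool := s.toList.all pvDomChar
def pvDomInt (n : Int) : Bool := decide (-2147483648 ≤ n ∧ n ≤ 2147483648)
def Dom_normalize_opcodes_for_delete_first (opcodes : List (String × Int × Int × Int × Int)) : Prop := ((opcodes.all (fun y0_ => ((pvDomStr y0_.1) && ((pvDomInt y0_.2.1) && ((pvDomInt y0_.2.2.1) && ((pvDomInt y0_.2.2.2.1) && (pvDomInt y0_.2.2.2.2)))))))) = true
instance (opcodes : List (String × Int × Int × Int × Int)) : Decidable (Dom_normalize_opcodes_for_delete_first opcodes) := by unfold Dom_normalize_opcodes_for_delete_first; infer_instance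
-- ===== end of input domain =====

-- B replaces A's indexed while-loop with two-element lookahead and i += 2 skips by a single
-- look-behind fold driven by a merge helper returning an Option; alternative decomposition, same cost.

-- ===== PORT A =====
-- A's while loop reads opcodes[i] and, when present, opcodes[i+1]; a merge consumes both
-- (i += 2), otherwise i advances by one. Transliterated as recursion on the suffix at i.
def normalize_opcodes_for_delete_first : List (String × Int × Int × Int × Int) → List (String × Int × Int × Int × Int)
  | [] => []
  | [x] => [x]
  | x :: y :: rest =>
    if x.1 = "insert" ∧ y.1 = "delete" ∧ x.2.1 = x.2.2.1 ∧ x.2.2.1 = y.2.1 ∧ y.2.1 = y.2.2.1 ∧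
        y.2.2.2.1 = y.2.2.2.2 ∧ y.2.2.2.2 = x.2.2.2.1 then
      ("replace", y.2.1, y.2.2.1, x.2.2.2.1, x.2.2.2.2) :: normalize_opcodes_for_delete_first rest
    else if x.1 = "delete" ∧ y.1 = "insert" ∧ x.2.2.2.1 = x.2.2.2.2 ∧ x.2.2.2.2 = y.2.2.2.1 ∧
        y.2.2.2.1 = y.2.2.2.2 ∧ y.2.1 = y.2.2.1 ∧ y.2.2.1 = x.2.1 then
      ("replace", x.2.1, x.2.2.1, y.2.2.2.1, y.2.2.2.2) :: normalize_opcodes_for_delete_first rest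
    else x :: normalize_opcodes_for_delete_first (y :: rest)
termination_by l => l.length

-- ===== PORT B =====
-- Source B's _merge_pair: the merged replace tuple, or none when the pair does not merge
def pvMergePair (prev cur : String × Int × Int × Int × Int) : Option (String × Int × Int × Int × Int) :=
  let (tag, i1, i2, j1, j2) := prev
  let (tag2, i1b, i2b, j1b, j2b) := cur
  if tag == "insert" && tag2 == "delete" && i1 == i2 && i2 == i1b && i1b == i2b && j1b == j2b && j2b == j1 then
    some ("replace", i1b, i2b, j1, j2)
  else if tag == "delete" && tag2 == "insert" && j1 == j2 && j2 == j1b && j1b == j2b && i1b == i2b && i2b == i1 then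
    some ("replace", i1, i2, j1b, j2b)
  else none

-- one fold step: merged = _merge_pair(out[-1], op) if out else None; overwrite out[-1] or append
def pvStepMerge (out_ : List (String × Int × Int × Int × Int)) (op : String × Int × Int × Int × Int) :
    List (String × Int × Int × Int × Int) :=
  match (match out_.getLast? with
         | some prev => pvMergePair prev op
         | none => none) with
  | some m => out_.dropLast ++ [m]
  | none => out_ ++ [op]

def normalize_opcodes_for_delete_first_alt (opcodes : List (String × Int × Int × Int × Int)) :
    List (String × Int × Int × Int × Int) :=
  opcodes.foldl pvStepMerge []

-- ===== PRECONDITION & SPEC =====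
def Spec_normalize_opcodes_for_delete_first (opcodes : List (String × Int × Int × Int × Int)) (out : List (String × Int × Int × Int × Int)) : Prop := out = normalize_opcodes_for_delete_first_alt opcodes
instance (opcodes : List (String × Int × Int × Int × Int)) (out : List (String × Int × Int × Int × Int)) : Decidable (Spec_normalize_opcodes_for_delete_first opcodes out) := by unfold Spec_normalize_opcodes_for_delete_first; infer_instance

-- ===== CLAIM (what is proved, stated in full; the proofs are below) =====
def Claim_equal_normalize_opcodes_for_delete_first : Prop := ∀ (opcodes : List (String × Int × Int × Int × Int)), Dom_normalize_opcodes_for_delete_first opcodes → Spec_normalize_opcodes_for_delete_first opcodes (normalize_opcodes_for_delete_first opcodes)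

-- ===== LEMMAS AND PROOFS =====

-- a "replace"-tagged opcode never merges with anything
theorem pvMergePair_replace {z op : String × Int × Int × Int × Int} (h : z.1 = "replace") :
    pvMergePair z op = none := by
  obtain ⟨t, a, b, c, d⟩ := z
  simp at h
  simp [pvMergePair, h]

-- pvMergePair agrees with A's two Prop conditions
theorem pvMergePair_eq_someID {x y : String × Int × Int × Int × Int}
    (h : x.1 = "insert" ∧ y.1 = "delete" ∧ x.2.1 = x.2.2.1 ∧ x.2.2.1 = y.2.1 ∧ y.2.1 = y.2.2.1 ∧
        y.2.2.2.1 = y.2.2.2.2 ∧ y.2.2.2.2 = x.2.2.2.1) :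
    pvMergePair x y = some ("replace", y.2.1, y.2.2.1, x.2.2.2.1, x.2.2.2.2) := by
  obtain ⟨t, a, b, c, d⟩ := x
  obtain ⟨t', a', b', c', d'⟩ := y
  simp_all [pvMergePair]

theorem pvMergePair_eq_someDI {x y : String × Int × Int × Int × Int}
    (h : x.1 = "delete" ∧ y.1 = "insert" ∧ x.2.2.2.1 = x.2.2.2.2 ∧ x.2.2.2.2 = y.2.2.2.1 ∧
        y.2.2.2.1 = y.2.2.2.2 ∧ y.2.1 = y.2.2.1 ∧ y.2.2.1 = x.2.1) :
    pvMergePair x y = some ("replace", x.2.1, x.2.2.1, y.2.2.2.1, y.2.2.2.2) := by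
  obtain ⟨t, a, b, c, d⟩ := x
  obtain ⟨t', a', b', c', d'⟩ := y
  simp_all [pvMergePair]

theorem pvMergePair_eq_none {x y : String × Int × Int × Int × Int}
    (h1 : ¬(x.1 = "insert" ∧ y.1 = "delete" ∧ x.2.1 = x.2.2.1 ∧ x.2.2.1 = y.2.1 ∧ y.2.1 = y.2.2.1 ∧
        y.2.2.2.1 = y.2.2.2.2 ∧ y.2.2.2.2 = x.2.2.2.1))
    (h2 : ¬(x.1 = "delete" ∧ y.1 = "insert" ∧ x.2.2.2.1 = x.2.2.2.2 ∧ x.2.2.2.2 = y.2.2.2.1 ∧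
        y.2.2.2.1 = y.2.2.2.2 ∧ y.2.1 = y.2.2.1 ∧ y.2.2.1 = x.2.1)) :
    pvMergePair x y = none := by
  obtain ⟨t, a, b, c, d⟩ := x
  obtain ⟨t', a', b', c', d'⟩ := y
  simp only [pvMergePair]
  split_ifs with g1 g2 <;> simp_all

theorem pvStepMerge_nomerge (acc : List (String × Int × Int × Int × Int))
    (op : String × Int × Int × Int × Int)
    (h : ∀ z, acc.getLast? = some z → pvMergePair z op = none) :
    pvStepMerge acc op = acc ++ [op] := by
  unfold pvStepMerge
  cases hl : acc.getLast? with
  | none => rfl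
  | some z => simp [h z hl]

-- key invariant: folding B's step from an accumulator whose last element cannot merge with
-- the head of l emits exactly A's normalization of l appended to acc
theorem pv_fold_eq_A (l acc : List (String × Int × Int × Int × Int))
    (h : ∀ z x, acc.getLast? = some z → l.head? = some x → pvMergePair z x = none) :
    List.foldl pvStepMerge acc l = acc ++ normalize_opcodes_for_delete_first l := by
  induction l using normalize_opcodes_for_delete_first.induct generalizing acc with
  | case1 => simp [normalize_opcodes_for_delete_first]
  | case2 x =>
    simp only [List.foldl, normalize_opcodes_for_delete_first]
    exact pvStepMerge_nomerge acc x (fun z hz => h z x hz rfl)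
  | case3 x y rest hID ih =>
    have hstep : pvStepMerge acc x = acc ++ [x] :=
      pvStepMerge_nomerge acc x (fun z hz => h z x hz rfl)
    have hmerge : pvStepMerge (acc ++ [x]) y =
        acc ++ [("replace", y.2.1, y.2.2.1, x.2.2.2.1, x.2.2.2.2)] := by
      unfold pvStepMerge
      simp [List.getLast?_append, pvMergePair_eq_someID hID]
    have hnext : List.foldl pvStepMerge
        (acc ++ [(("replace", y.2.1, y.2.2.1, x.2.2.2.1, x.2.2.2.2) : String × Int × Int × Int × Int)]) rest =
        (acc ++ [("replace", y.2.1, y.2.2.1, x.2.2.2.1, x.2.2.2.2)]) ++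
          normalize_opcodes_for_delete_first rest := by
      apply ih
      intro z w hz hw
      simp [List.getLast?_append] at hz
      subst hz
      exact pvMergePair_replace rfl
    simp only [List.foldl, hstep, hmerge, hnext]
    simp [normalize_opcodes_for_delete_first, hID]
  | case4 x y rest hID hDI ih =>
    have hstep : pvStepMerge acc x = acc ++ [x] :=
      pvStepMerge_nomerge acc x (fun z hz => h z x hz rfl)
    have hmerge : pvStepMerge (acc ++ [x]) y =
        acc ++ [("replace", x.2.1, x.2.2.1, y.2.2.2.1, y.2.2.2.2)] := by
      unfold pvStepMerge
      simp [List.getLast?_append, pvMergePair_eq_someDI hDI]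
    have hnext : List.foldl pvStepMerge
        (acc ++ [(("replace", x.2.1, x.2.2.1, y.2.2.2.1, y.2.2.2.2) : String × Int × Int × Int × Int)]) rest =
        (acc ++ [("replace", x.2.1, x.2.2.1, y.2.2.2.1, y.2.2.2.2)]) ++
          normalize_opcodes_for_delete_first rest := by
      apply ih
      intro z w hz hw
      simp [List.getLast?_append] at hz
      subst hz
      exact pvMergePair_replace rfl
    simp only [List.foldl, hstep, hmerge, hnext]
    simp [normalize_opcodes_for_delete_first, hDI]
  | case5 x y rest hID hDI ih =>
    have hstep : pvStepMerge acc x = acc ++ [x] :=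
      pvStepMerge_nomerge acc x (fun z hz => h z x hz rfl)
    have hnext : List.foldl pvStepMerge (acc ++ [x]) (y :: rest) =
        (acc ++ [x]) ++ normalize_opcodes_for_delete_first (y :: rest) := by
      apply ih
      intro z w hz hw
      simp [List.getLast?_append] at hz
      simp at hw
      subst hz; subst hw
      exact pvMergePair_eq_none hID hDI
    rw [List.foldl_cons, hstep, hnext]
    simp [normalize_opcodes_for_delete_first, hID, hDI]

-- ===== VERDICT (by name: the statement is the Claim_ definition above) =====
theorem normalize_opcodes_for_delete_first_spec : Claim_equal_normalize_opcodes_for_delete_first := by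
  intro opcodes _
  unfold Spec_normalize_opcodes_for_delete_first normalize_opcodes_for_delete_first_alt
  have := pv_fold_eq_A opcodes [] (by intro z x hz hx; simp at hz)
  simp [this]
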